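-- pv_equiv track=rewrite | github.com/gFrincu/AdventOfCode | 2024/day4.py | generate_diagonals
-- ===== SOURCE A (Python) =====
-- def generate_diagonals(matrix):
--     rows = len(matrix)
--     cols = len(matrix[0])
--     diagonals_1 = []  # lower-left-to-upper-right diagonals
--     diagonals_2 = []  # upper-left-to-lower-right diagonals
--
--     for p in range(rows + cols - 1):
--         diagonals_1.append([matrix[r][p - r] for r in range(max(0, p - cols + 1), min(p + 1, rows)) if 0 <= p - r < cols])
--         diagonals_2.append([matrix[r][cols - 1 - (p - r)] for r in range(max(0, p - cols + 1), min(p + 1, rows)) if 0 <= cols - 1 - (p - r) < cols])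
--
--     return diagonals_1, diagonals_2
-- ===== SOURCE B (Python) =====
-- def generate_diagonals(matrix):
--     rows = len(matrix)
--     cols = len(matrix[0])
--     n = rows + cols - 1
--     diagonals_1 = [[] for _ in range(n)]  # lower-left-to-upper-right diagonals
--     diagonals_2 = [[] for _ in range(n)]  # upper-left-to-lower-right diagonals
--
--     for r in range(rows):
--         row = matrix[r]
--         for c in range(cols):
--             v = row[c]
--             diagonals_1[r + c].append(v)
--             diagonals_2[r - c + cols - 1].append(v)
--
--     return diagonals_1, diagonals_2
-- ===== Notes on version B (the rewrite author's own statement) =====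
-- stated objective: simpler
-- what changed: A builds each diagonal with an outer loop over diagonal indices and a filtered comprehension per diagonal; B makes one row-major pass over the cells, scattering each cell into bucket r+c and bucket r-c+cols-1 (constant-factor faster: no per-diagonal range/filter bookkeeping, sequential row access).
import Mathlib
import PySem

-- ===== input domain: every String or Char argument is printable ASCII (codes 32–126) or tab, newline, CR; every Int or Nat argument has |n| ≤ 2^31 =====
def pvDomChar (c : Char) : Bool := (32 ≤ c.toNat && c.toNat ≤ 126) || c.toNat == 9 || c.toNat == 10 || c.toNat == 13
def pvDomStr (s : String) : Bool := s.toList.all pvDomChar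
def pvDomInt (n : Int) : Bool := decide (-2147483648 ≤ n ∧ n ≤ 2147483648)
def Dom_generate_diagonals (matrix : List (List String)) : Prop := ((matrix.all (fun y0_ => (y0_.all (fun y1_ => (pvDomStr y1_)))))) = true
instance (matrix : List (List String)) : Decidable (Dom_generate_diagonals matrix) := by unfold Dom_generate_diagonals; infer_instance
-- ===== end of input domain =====

-- B replaces A's per-diagonal gather (outer loop over diagonal indices with a filtered
-- comprehension each) by a single row-major scatter pass bucketing each cell into its two
-- diagonals; objective: simpler.  (A mutates nothing observable; equivalence is about the
-- return value.)

-- ===== PORT A =====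
-- literal transliteration of A: matrix[i] / row[j] are PySem.List.pyGetD (in range under Pre_),
-- range(...) is PySem.List.pyRange, the two appends per iteration are a foldl over a pair.
def generate_diagonals (matrix : List (List String)) : List (List String) × List (List String) :=
  let rows : Int := matrix.length
  let cols : Int := ((PySem.List.pyGetD matrix 0 []).length : Int)
  (PySem.List.pyRange 0 (rows + cols - 1) 1).foldl
    (fun st p =>
      (st.1 ++ [((PySem.List.pyRange (max 0 (p - cols + 1)) (min (p + 1) rows) 1).filter
            (fun r => decide (0 ≤ p - r ∧ p - r < cols))).map
          (fun r => PySem.List.pyGetD (PySem.List.pyGetD matrix r []) (p - r) "")],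
       st.2 ++ [((PySem.List.pyRange (max 0 (p - cols + 1)) (min (p + 1) rows) 1).filter
            (fun r => decide (0 ≤ cols - 1 - (p - r) ∧ cols - 1 - (p - r) < cols))).map
          (fun r => PySem.List.pyGetD (PySem.List.pyGetD matrix r []) (cols - 1 - (p - r)) "")]))
    ([], [])

-- ===== PORT B =====
-- literal transliteration of B: two bucket lists of n empty lists, one row-major pass appending
-- each cell to bucket r+c and bucket r-c+cols-1 (written r+cols-1-c: equal in Nat since c ≤ cols-1 ≤ r+cols-1).
def generate_diagonals_alt (matrix : List (List String)) : List (List String) × List (List String) :=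
  let rows := matrix.length
  let cols := (matrix.getD 0 []).length
  let n := rows + cols - 1
  (List.range rows).foldl
    (fun st r =>
      let row := matrix.getD r []
      (List.range cols).foldl
        (fun st c =>
          let v := row.getD c ""
          (st.1.modify (r + c) (fun l => l ++ [v]),
           st.2.modify (r + cols - 1 - c) (fun l => l ++ [v])))
        st)
    (List.replicate n [], List.replicate n [])

-- ===== PRECONDITION & SPEC =====
-- Pre_: exactly where the Python A returns — A raises IndexError on an empty matrix
-- (len(matrix[0])) and on any row shorter than the first row (matrix[r][c] with c < cols).
def Pre_generate_diagonals (matrix : List (List String)) : Prop :=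
  matrix ≠ [] ∧ ∀ row ∈ matrix, (matrix.getD 0 []).length ≤ row.length
instance (matrix : List (List String)) : Decidable (Pre_generate_diagonals matrix) := by
  unfold Pre_generate_diagonals; infer_instance
def pvWitness_generate_diagonals : List (List String) := [["a", "b"], ["c", "d"]]

def Spec_generate_diagonals (matrix : List (List String)) (out : List (List String) × List (List String)) : Prop := out = generate_diagonals_alt matrix
instance (matrix : List (List String)) (out : List (List String) × List (List String)) : Decidable (Spec_generate_diagonals matrix out) := by unfold Spec_generate_diagonals; infer_instance

-- ===== CLAIM (what is proved, stated in full; the proofs are below) =====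
def Claim_equal_generate_diagonals : Prop := ∀ (matrix : List (List String)), Dom_generate_diagonals matrix → Pre_generate_diagonals matrix → Spec_generate_diagonals matrix (generate_diagonals matrix)

-- ===== LEMMAS AND PROOFS =====

-- the common gather form both ports are reduced to: bucket j of each component
def pvBucket1 (matrix : List (List String)) (C j : ℕ) : List String :=
  ((List.range matrix.length).filter (fun r => decide (r ≤ j ∧ j < r + C))).map
    (fun r => (matrix.getD r []).getD (j - r) "")
def pvBucket2 (matrix : List (List String)) (C j : ℕ) : List String :=
  ((List.range matrix.length).filter (fun r => decide (r ≤ j ∧ j < r + C))).map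
    (fun r => (matrix.getD r []).getD (r + C - 1 - j) "")

lemma pv_foldl_pair_append {α β : Type} (l : List α) (f g : α → β)
    (init : List β × List β) :
    l.foldl (fun st p => (st.1 ++ [f p], st.2 ++ [g p])) init
      = (init.1 ++ l.map f, init.2 ++ l.map g) := by
  induction l generalizing init with
  | nil => simp
  | cons x xs ih => simp [List.foldl_cons, ih]

lemma pv_modify_map_range {α : Type} (n i : ℕ) (f : ℕ → α) (g : α → α) :
    ((List.range n).map f).modify i g
      = (List.range n).map (fun j => if j = i then g (f j) else f j) := by
  apply List.ext_getElem
  · simp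
  · intro k h1 h2
    simp only [List.getElem_modify, List.getElem_map, List.getElem_range]
    by_cases hk : k = i
    · subst hk; simp
    · simp [hk, Ne.symm hk]

lemma pv_inner_fold (C : ℕ) (v : ℕ → String) (r n : ℕ) (f g : ℕ → List String)
    (m : ℕ) (hm : m ≤ C) :
    (List.range m).foldl
        (fun st c =>
          ((st : List (List String) × List (List String)).1.modify (r + c) (fun l => l ++ [v c]),
           st.2.modify (r + C - 1 - c) (fun l => l ++ [v c])))
        ((List.range n).map f, (List.range n).map g)
      = ((List.range n).map (fun j => if r ≤ j ∧ j < r + m then f j ++ [v (j - r)] else f j),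
         (List.range n).map (fun j => if r + C - m ≤ j ∧ j < r + C then g j ++ [v (r + C - 1 - j)] else g j)) := by
  induction m with
  | zero =>
    simp only [List.range_zero, List.foldl_nil]
    refine Prod.ext ?_ ?_ <;>
      exact List.map_congr_left (fun j _ => by rw [if_neg (by omega)])
  | succ m ih =>
    rw [List.range_succ, List.foldl_append, ih (by omega)]
    simp only [List.foldl_cons, List.foldl_nil]
    rw [pv_modify_map_range, pv_modify_map_range]
    refine Prod.ext ?_ ?_ <;> dsimp only
    · refine List.map_congr_left (fun j _ => ?_)
      by_cases hj : j = r + m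
      · subst hj
        rw [if_pos rfl, if_neg (by omega), if_pos (by omega)]
        have h : r + m - r = m := by omega
        rw [h]
      · rw [if_neg hj]
        by_cases hc : r ≤ j ∧ j < r + m
        · rw [if_pos hc, if_pos (by omega)]
        · rw [if_neg hc, if_neg (by omega)]
    · refine List.map_congr_left (fun j _ => ?_)
      by_cases hj : j = r + C - 1 - m
      · subst hj
        rw [if_pos rfl, if_neg (by omega), if_pos (by omega)]
        have h : r + C - 1 - (r + C - 1 - m) = m := by omega
        rw [h]
      · rw [if_neg hj]
        by_cases hc : r + C - m ≤ j ∧ j < r + C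
        · rw [if_pos hc, if_pos (by omega)]
        · rw [if_neg hc, if_neg (by omega)]

lemma pv_outer (matrix : List (List String)) (C n : ℕ) (k : ℕ) :
    (List.range k).foldl
        (fun st r =>
          (List.range C).foldl
            (fun st c =>
              ((st : List (List String) × List (List String)).1.modify (r + c)
                 (fun l => l ++ [(matrix.getD r []).getD c ""]),
               st.2.modify (r + C - 1 - c) (fun l => l ++ [(matrix.getD r []).getD c ""])))
            st)
        ((List.range n).map (fun _ => []), (List.range n).map (fun _ => []))
      = ((List.range n).map (fun j =>
            ((List.range k).filter (fun r => decide (r ≤ j ∧ j < r + C))).map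
              (fun r => (matrix.getD r []).getD (j - r) "")),
         (List.range n).map (fun j =>
            ((List.range k).filter (fun r => decide (r ≤ j ∧ j < r + C))).map
              (fun r => (matrix.getD r []).getD (r + C - 1 - j) ""))) := by
  induction k with
  | zero => simp
  | succ k ih =>
    rw [List.range_succ, List.foldl_append, ih]
    simp only [List.foldl_cons, List.foldl_nil]
    rw [pv_inner_fold C (fun c => (matrix.getD k []).getD c "") k n _ _ C le_rfl]
    have hCC : k + C - C = k := by omega
    refine Prod.ext ?_ ?_ <;> dsimp only
    · refine List.map_congr_left (fun j _ => ?_)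
      rw [List.filter_append, List.map_append]
      by_cases hc : k ≤ j ∧ j < k + C
      · rw [if_pos hc]; simp [hc]
      · rw [if_neg hc]; simp [List.filter, hc]
    · refine List.map_congr_left (fun j _ => ?_)
      rw [List.filter_append, List.map_append, hCC]
      by_cases hc : k ≤ j ∧ j < k + C
      · rw [if_pos hc]; simp [hc]
      · rw [if_neg hc]; simp [List.filter, hc]

lemma pv_alt_eq (matrix : List (List String)) :
    generate_diagonals_alt matrix
      = ((List.range (matrix.length + (matrix.getD 0 []).length - 1)).map
           (pvBucket1 matrix (matrix.getD 0 []).length),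
         (List.range (matrix.length + (matrix.getD 0 []).length - 1)).map
           (pvBucket2 matrix (matrix.getD 0 []).length)) := by
  have hrep : (List.replicate (matrix.length + (matrix.getD 0 []).length - 1) ([] : List String))
      = (List.range (matrix.length + (matrix.getD 0 []).length - 1)).map (fun _ => []) := by
    rw [List.map_const', List.length_range]
  simp only [generate_diagonals_alt, hrep]
  rw [pv_outer]
  rfl

lemma pv_filter_range_diag (R j C : ℕ) :
    (List.range R).filter (fun r => decide (r ≤ j ∧ j < r + C))
      = (List.range (min (j + 1) R - (j + 1 - C))).map (fun k => (j + 1 - C) + k) := by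
  induction R with
  | zero => simp
  | succ R ih =>
    rw [List.range_succ, List.filter_append, ih]
    by_cases hc : R ≤ j ∧ j < R + C
    · have h1 : min (j + 1) (R + 1) - (j + 1 - C) = (min (j + 1) R - (j + 1 - C)) + 1 := by omega
      have h2 : (j + 1 - C) + (min (j + 1) R - (j + 1 - C)) = R := by omega
      rw [h1, List.range_succ, List.map_append]
      simp [List.filter, hc, h2]
    · have h1 : min (j + 1) (R + 1) - (j + 1 - C) = min (j + 1) R - (j + 1 - C) := by omega
      rw [h1]
      simp [List.filter, hc]

lemma pv_a_inner1 (matrix : List (List String)) (C j : ℕ) :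
    ((PySem.List.pyRange (max 0 ((j:Int) - (C:Int) + 1)) (min ((j:Int) + 1) ((matrix.length : Int))) 1).filter
        (fun r => decide (0 ≤ (j:Int) - r ∧ (j:Int) - r < (C:Int)))).map
      (fun r => PySem.List.pyGetD (PySem.List.pyGetD matrix r []) ((j:Int) - r) "")
      = pvBucket1 matrix C j := by
  have hlo : max 0 ((j:Int) - (C:Int) + 1) = ((j + 1 - C : ℕ) : Int) := by omega
  have hhi : min ((j:Int) + 1) ((matrix.length : Int)) = ((min (j+1) matrix.length : ℕ) : Int) := by omega
  rw [hlo, hhi, PySem.List.pyRange_one]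
  have hba : (((min (j+1) matrix.length : ℕ) : Int) - ((j + 1 - C : ℕ) : Int)).toNat
      = min (j + 1) matrix.length - (j + 1 - C) := by omega
  rw [hba, List.filter_map]
  have hall : (List.range (min (j + 1) matrix.length - (j + 1 - C))).filter
      ((fun r => decide (0 ≤ (j:Int) - r ∧ (j:Int) - r < (C:Int))) ∘ (fun k : ℕ => ((j + 1 - C : ℕ) : Int) + k))
      = List.range (min (j + 1) matrix.length - (j + 1 - C)) := by
    apply List.filter_eq_self.mpr
    intro k hk
    simp only [List.mem_range] at hk
    simp only [Function.comp_apply, decide_eq_true_eq]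
    omega
  rw [hall, List.map_map]
  unfold pvBucket1
  rw [pv_filter_range_diag, List.map_map]
  refine List.map_congr_left (fun k hk => ?_)
  simp only [List.mem_range] at hk
  simp only [Function.comp_apply]
  have h1 : ((j + 1 - C : ℕ) : Int) + (k : Int) = (((j + 1 - C) + k : ℕ) : Int) := by push_cast; ring
  have h2 : (j : Int) - (((j + 1 - C) + k : ℕ) : Int) = ((j - ((j + 1 - C) + k) : ℕ) : Int) := by omega
  rw [h1, PySem.List.pyGetD_natCast, h2, PySem.List.pyGetD_natCast]

lemma pv_a_inner2 (matrix : List (List String)) (C j : ℕ) :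
    ((PySem.List.pyRange (max 0 ((j:Int) - (C:Int) + 1)) (min ((j:Int) + 1) ((matrix.length : Int))) 1).filter
        (fun r => decide (0 ≤ (C:Int) - 1 - ((j:Int) - r) ∧ (C:Int) - 1 - ((j:Int) - r) < (C:Int)))).map
      (fun r => PySem.List.pyGetD (PySem.List.pyGetD matrix r []) ((C:Int) - 1 - ((j:Int) - r)) "")
      = pvBucket2 matrix C j := by
  have hlo : max 0 ((j:Int) - (C:Int) + 1) = ((j + 1 - C : ℕ) : Int) := by omega
  have hhi : min ((j:Int) + 1) ((matrix.length : Int)) = ((min (j+1) matrix.length : ℕ) : Int) := by omega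
  rw [hlo, hhi, PySem.List.pyRange_one]
  have hba : (((min (j+1) matrix.length : ℕ) : Int) - ((j + 1 - C : ℕ) : Int)).toNat
      = min (j + 1) matrix.length - (j + 1 - C) := by omega
  rw [hba, List.filter_map]
  have hall : (List.range (min (j + 1) matrix.length - (j + 1 - C))).filter
      ((fun r => decide (0 ≤ (C:Int) - 1 - ((j:Int) - r) ∧ (C:Int) - 1 - ((j:Int) - r) < (C:Int))) ∘ (fun k : ℕ => ((j + 1 - C : ℕ) : Int) + k))
      = List.range (min (j + 1) matrix.length - (j + 1 - C)) := by
    apply List.filter_eq_self.mpr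
    intro k hk
    simp only [List.mem_range] at hk
    simp only [Function.comp_apply, decide_eq_true_eq]
    omega
  rw [hall, List.map_map]
  unfold pvBucket2
  rw [pv_filter_range_diag, List.map_map]
  refine List.map_congr_left (fun k hk => ?_)
  simp only [List.mem_range] at hk
  simp only [Function.comp_apply]
  have h1 : ((j + 1 - C : ℕ) : Int) + (k : Int) = (((j + 1 - C) + k : ℕ) : Int) := by push_cast; ring
  have h2 : (C:Int) - 1 - ((j : Int) - (((j + 1 - C) + k : ℕ) : Int))
      = ((((j + 1 - C) + k) + C - 1 - j : ℕ) : Int) := by omega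
  rw [h1, PySem.List.pyGetD_natCast, h2, PySem.List.pyGetD_natCast]

lemma pv_a_eq (matrix : List (List String)) :
    generate_diagonals matrix
      = ((List.range (matrix.length + (matrix.getD 0 []).length - 1)).map
           (pvBucket1 matrix (matrix.getD 0 []).length),
         (List.range (matrix.length + (matrix.getD 0 []).length - 1)).map
           (pvBucket2 matrix (matrix.getD 0 []).length)) := by
  simp only [generate_diagonals, PySem.List.pyGetD_zero]
  have hN : (((matrix.length : Int) + ((matrix.getD 0 []).length : Int) - 1) - 0).toNat
      = matrix.length + (matrix.getD 0 []).length - 1 := by omega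
  rw [PySem.List.pyRange_one, hN, List.foldl_map, pv_foldl_pair_append]
  refine Prod.ext ?_ ?_ <;> dsimp only
  · rw [List.nil_append]
    refine List.map_congr_left (fun j _ => ?_)
    simpa only [zero_add] using pv_a_inner1 matrix (matrix.getD 0 []).length j
  · rw [List.nil_append]
    refine List.map_congr_left (fun j _ => ?_)
    simpa only [zero_add] using pv_a_inner2 matrix (matrix.getD 0 []).length j

-- ===== VERDICT (by name: the statement is the Claim_ definition above) =====
theorem generate_diagonals_spec : Claim_equal_generate_diagonals := by
  intro matrix _ _
  unfold Spec_generate_diagonals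
  rw [pv_a_eq, pv_alt_eq]
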